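-- pv_equiv track=rewrite | github.com/baharehdm/Python-projects | Polynome.py | create_poly_sentence
-- ===== SOURCE A (Python) =====
-- def create_poly_sentence(dict):
--     '''
--     :param dict: the dictionary of polynome factor and exponent
--     :return: polynome sentence
--
--     The method create a polynome sentence in the string format. It
--     also prevents from returning two or more zero polynome in the sentence
--     with already one non-zero polynome.
--     '''
--     poly_created_list = []
--     removed_zero_list = []
--     for exponent in sorted(dict, reverse=True):
--         if dict[exponent] != 0:
--             poly_item = str(dict[exponent]) + "x" + "^" + str(exponent)
--         else:
--             poly_item = '0'
--         poly_created_list.append(poly_item)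
--
--     for x in poly_created_list:
--         if x not in removed_zero_list:
--             removed_zero_list.append(x)
--     if len(removed_zero_list) > 1:
--         if '0' in poly_created_list:
--             removed_zero_list.remove('0')
--
--     return " + ".join(removed_zero_list)
-- ===== SOURCE B (Python) =====
-- def create_poly_sentence(dict):
--     # One pass: collect only the non-zero terms; the all-zero and empty cases
--     # are handled directly, so no dedup pass and no '0'-removal pass is needed.
--     terms = [str(dict[e]) + "x^" + str(e) for e in sorted(dict, reverse=True) if dict[e] != 0]
--     if terms:
--         return " + ".join(terms)
--     return '0' if dict else ''
-- ===== Notes on version B (the rewrite author's own statement) =====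
-- stated objective: simpler
-- what changed: B builds only the non-zero terms in a single filtered pass and joins them, handling the all-zero ('0') and empty ('') dicts directly, instead of A's three phases (emit '0' placeholders, dedup them with a quadratic membership-scan loop, then conditionally remove the '0').
import Mathlib
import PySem

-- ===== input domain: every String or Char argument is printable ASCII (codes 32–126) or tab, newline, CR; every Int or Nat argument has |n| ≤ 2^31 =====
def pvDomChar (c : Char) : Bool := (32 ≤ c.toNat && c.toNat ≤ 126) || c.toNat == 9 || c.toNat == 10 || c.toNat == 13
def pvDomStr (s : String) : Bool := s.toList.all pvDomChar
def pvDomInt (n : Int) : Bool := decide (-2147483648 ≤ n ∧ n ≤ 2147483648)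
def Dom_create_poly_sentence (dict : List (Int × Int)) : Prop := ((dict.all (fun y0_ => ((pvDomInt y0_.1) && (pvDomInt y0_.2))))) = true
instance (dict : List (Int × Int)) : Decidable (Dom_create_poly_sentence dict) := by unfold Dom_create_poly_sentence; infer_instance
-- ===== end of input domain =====

-- B builds only the non-zero terms in one filtered pass (handling the all-zero and empty
-- dicts directly) instead of A's emit-placeholders / dedup-scan / conditional-removal phases.


-- ===== PORT A =====
-- literal port of A: first loop emits a term (or the placeholder '0') per key in reverse-sorted
-- order; second loop deduplicates by membership scan; then the '0' is conditionally removed.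
-- dict[exponent] is (dict.lookup exponent).getD 0 — the key always comes from dict's own keys,
-- so the lookup never misses and the .getD 0 default is never used (KeyError is impossible).
def create_poly_sentence (dict : List (Int × Int)) : String :=
  let poly_created_list :=
    (PySem.List.sorted (dict.map Prod.fst) (fun x => x) true).foldl
      (fun acc exponent =>
        let poly_item :=
          if ((dict.lookup exponent).getD 0) ≠ 0 then
            PySem.Int.toStr ((dict.lookup exponent).getD 0) ++ "x" ++ "^" ++ PySem.Int.toStr exponent
          else "0"
        acc ++ [poly_item]) []
  let removed_zero_list :=
    poly_created_list.foldl (fun acc x => if x ∈ acc then acc else acc ++ [x]) []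
  let removed_zero_list :=
    if removed_zero_list.length > 1 then
      if "0" ∈ poly_created_list then
        -- list.remove('0'): '0' is certainly present, so remove? never misses (no ValueError)
        (PySem.List.remove? removed_zero_list "0").getD removed_zero_list
      else removed_zero_list
    else removed_zero_list
  PySem.Str.join " + " removed_zero_list

-- ===== PORT B =====
-- literal port of B: one filtered pass building only the non-zero terms, then join;
-- the all-zero non-empty dict gives "0" and the empty dict gives "" directly.
def create_poly_sentence_alt (dict : List (Int × Int)) : String :=
  let terms :=
    ((PySem.List.sorted (dict.map Prod.fst) (fun x => x) true).filter
        (fun e => ((dict.lookup e).getD 0) ≠ 0)).map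
      (fun e => PySem.Int.toStr ((dict.lookup e).getD 0) ++ "x^" ++ PySem.Int.toStr e)
  if terms ≠ [] then PySem.Str.join " + " terms
  else if dict ≠ [] then "0" else ""

-- ===== PRECONDITION & SPEC =====
-- Pre_ excludes association lists with duplicate keys: the Python argument is a dict, which
-- cannot hold a key twice, so such lists represent no Python input at all.
def Pre_create_poly_sentence (dict : List (Int × Int)) : Prop := (dict.map Prod.fst).Nodup
instance (dict : List (Int × Int)) : Decidable (Pre_create_poly_sentence dict) := by
  unfold Pre_create_poly_sentence; infer_instance

def pvWitness_create_poly_sentence : (List (Int × Int)) := [(2, 3), (1, 0)]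

def Spec_create_poly_sentence (dict : List (Int × Int)) (out : String) : Prop :=
  out = create_poly_sentence_alt dict
instance (dict : List (Int × Int)) (out : String) : Decidable (Spec_create_poly_sentence dict out) := by
  unfold Spec_create_poly_sentence; infer_instance

-- ===== CLAIM (what is proved, stated in full; the proofs are below) =====
def Claim_equal_create_poly_sentence : Prop :=
  ∀ (dict : List (Int × Int)), Dom_create_poly_sentence dict →
    Pre_create_poly_sentence dict →
    Spec_create_poly_sentence dict (create_poly_sentence dict)

-- ===== LEMMAS AND PROOFS =====

-- decimal digits of a natural number, as Nat.toDigits 10 produces them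
def pvDecChars (n : Nat) : List Char :=
  if h : n < 10 then [Nat.digitChar n]
  else pvDecChars (n / 10) ++ [Nat.digitChar (n % 10)]
  decreasing_by exact Nat.div_lt_self (by omega) (by omega)

lemma pv_digitChar_toNat {m : Nat} (h : m < 10) : (Nat.digitChar m).toNat = 48 + m := by
  interval_cases m <;> decide

lemma pv_decChars_ne_nil (n : Nat) : pvDecChars n ≠ [] := by
  rw [pvDecChars]; split <;> simp

lemma pv_decChars_digit (n : Nat) : ∀ c ∈ pvDecChars n, 48 ≤ c.toNat ∧ c.toNat ≤ 57 := by
  induction n using Nat.strong_induction_on with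
  | _ n ih =>
    rw [pvDecChars]
    split
    · rename_i h
      intro c hc
      simp only [List.mem_singleton] at hc
      subst hc
      rw [pv_digitChar_toNat h]; omega
    · rename_i h
      intro c hc
      rcases List.mem_append.mp hc with h1 | h1
      · exact ih (n / 10) (Nat.div_lt_self (by omega) (by omega)) c h1
      · simp only [List.mem_singleton] at h1
        subst h1
        rw [pv_digitChar_toNat (Nat.mod_lt _ (by omega))]; omega

def pvDecVal (cs : List Char) : Nat := cs.foldl (fun a c => 10 * a + (c.toNat - 48)) 0

lemma pv_decVal_decChars (n : Nat) : pvDecVal (pvDecChars n) = n := by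
  induction n using Nat.strong_induction_on with
  | _ n ih =>
    rw [pvDecChars]
    split
    · rename_i h
      simp [pvDecVal, pv_digitChar_toNat h]
    · rename_i h
      have hd := ih (n / 10) (Nat.div_lt_self (by omega) (by omega))
      simp only [pvDecVal, List.foldl_append, List.foldl_cons, List.foldl_nil] at hd ⊢
      rw [hd, pv_digitChar_toNat (Nat.mod_lt _ (by omega))]
      omega

lemma pv_decChars_inj {a b : Nat} (h : pvDecChars a = pvDecChars b) : a = b := by
  have := congrArg pvDecVal h
  simpa [pv_decVal_decChars] using this

lemma pv_toDigitsCore_eq :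
    ∀ (f n : Nat) (acc : List Char), 0 < f → n < 10 ^ f →
      Nat.toDigitsCore 10 f n acc = pvDecChars n ++ acc := by
  intro f
  induction f with
  | zero => intro n acc h; omega
  | succ f ih =>
    intro n acc _ hlt
    by_cases h10 : n / 10 = 0
    · have hn : n < 10 := by omega
      rw [show Nat.toDigitsCore 10 (f + 1) n acc
          = if n / 10 = 0 then (n % 10).digitChar :: acc
            else Nat.toDigitsCore 10 f (n / 10) ((n % 10).digitChar :: acc) from rfl]
      rw [if_pos h10, pvDecChars, dif_pos hn, Nat.mod_eq_of_lt hn]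
      simp
    · have hfpos : 0 < f := by
        by_contra hf
        have : f = 0 := by omega
        subst this
        norm_num at hlt
        omega
      have hdiv : n / 10 < 10 ^ f := by
        rw [Nat.div_lt_iff_lt_mul (by omega)]
        calc n < 10 ^ (f + 1) := hlt
        _ = 10 ^ f * 10 := by rw [pow_succ]
      have hn : ¬ n < 10 := by
        intro hc
        exact h10 (Nat.div_eq_of_lt hc)
      rw [show Nat.toDigitsCore 10 (f + 1) n acc
          = if n / 10 = 0 then (n % 10).digitChar :: acc
            else Nat.toDigitsCore 10 f (n / 10) ((n % 10).digitChar :: acc) from rfl]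
      rw [if_neg h10, ih (n / 10) _ hfpos hdiv]
      conv_rhs => rw [pvDecChars]
      rw [dif_neg hn]
      simp

lemma pv_toDigits_eq (n : Nat) : Nat.toDigits 10 n = pvDecChars n := by
  have h1 : n < 10 ^ (n + 1) := by
    calc n < 10 ^ n := Nat.lt_pow_self (by omega)
    _ ≤ 10 ^ (n + 1) := Nat.pow_le_pow_right (by omega) (Nat.le_succ n)
  have := pv_toDigitsCore_eq (n + 1) n [] (by omega) h1
  simpa [Nat.toDigits] using this

lemma pv_toChars_digit (n : Int) :
    ∀ c ∈ PySem.Int.toChars n, c.toNat = 45 ∨ (48 ≤ c.toNat ∧ c.toNat ≤ 57) := by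
  simp only [PySem.Int.toChars, pv_toDigits_eq]
  split
  · intro c hc
    rcases List.mem_cons.mp hc with h1 | h1
    · subst h1; left; decide
    · right; exact pv_decChars_digit _ c h1
  · intro c hc
    right; exact pv_decChars_digit _ c hc

lemma pv_x_notin (n : Int) : 'x' ∉ PySem.Int.toChars n := by
  intro h
  rcases pv_toChars_digit n 'x' h with h1 | h1 <;> simp [Char.toNat] at h1

lemma pv_toChars_inj {a b : Int} (h : PySem.Int.toChars a = PySem.Int.toChars b) : a = b := by
  simp only [PySem.Int.toChars, pv_toDigits_eq] at h
  split_ifs at h with ha hb hb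
  · simp only [List.cons.injEq, true_and] at h
    have := pv_decChars_inj h
    omega
  · obtain ⟨c, t, hct⟩ := List.exists_cons_of_ne_nil (pv_decChars_ne_nil b.toNat)
    rw [hct] at h
    simp only [List.cons.injEq] at h
    have hc : c ∈ pvDecChars b.toNat := by rw [hct]; exact List.mem_cons_self
    have h48 := (pv_decChars_digit b.toNat c hc).1
    rw [← h.1] at h48
    exact absurd h48 (by decide)
  · obtain ⟨c, t, hct⟩ := List.exists_cons_of_ne_nil (pv_decChars_ne_nil a.toNat)
    rw [hct] at h
    simp only [List.cons.injEq] at h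
    have hc : c ∈ pvDecChars a.toNat := by rw [hct]; exact List.mem_cons_self
    have h48 := (pv_decChars_digit a.toNat c hc).1
    rw [h.1] at h48
    exact absurd h48 (by decide)
  · have := pv_decChars_inj h
    omega

lemma pv_split_at (x : Char) :
    ∀ (a1 a2 t1 t2 : List Char), x ∉ a1 → x ∉ a2 →
      a1 ++ x :: t1 = a2 ++ x :: t2 → a1 = a2 ∧ t1 = t2 := by
  intro a1
  induction a1 with
  | nil =>
    intro a2 t1 t2 _ h2 h
    cases a2 with
    | nil => simpa using h
    | cons b bs =>
      simp only [List.nil_append, List.cons_append, List.cons.injEq] at h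
      exact absurd (h.1 ▸ List.mem_cons_self) h2
  | cons a as ih =>
    intro a2 t1 t2 h1 h2 h
    cases a2 with
    | nil =>
      simp only [List.cons_append, List.nil_append, List.cons.injEq] at h
      exact absurd (h.1 ▸ List.mem_cons_self) h1
    | cons b bs =>
      simp only [List.cons_append, List.cons.injEq] at h
      have := ih bs t1 t2 (fun hx => h1 (List.mem_cons_of_mem _ hx))
        (fun hx => h2 (List.mem_cons_of_mem _ hx)) h.2
      exact ⟨by rw [h.1, this.1], this.2⟩

lemma pv_toList_term (c e : Int) :
    (PySem.Int.toStr c ++ "x" ++ "^" ++ PySem.Int.toStr e).toList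
      = PySem.Int.toChars c ++ 'x' :: '^' :: PySem.Int.toChars e := by
  simp [String.toList_append, PySem.Int.toList_toStr,
    show ("x" : String).toList = ['x'] from by decide,
    show ("^" : String).toList = ['^'] from by decide]

lemma pv_term_inj {c1 c2 e1 e2 : Int}
    (h : PySem.Int.toStr c1 ++ "x" ++ "^" ++ PySem.Int.toStr e1
       = PySem.Int.toStr c2 ++ "x" ++ "^" ++ PySem.Int.toStr e2) : e1 = e2 := by
  have hl := congrArg String.toList h
  rw [pv_toList_term, pv_toList_term] at hl
  have := pv_split_at 'x' _ _ _ _ (pv_x_notin c1) (pv_x_notin c2) hl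
  have ht := this.2
  simp only [List.cons.injEq] at ht
  exact pv_toChars_inj ht.2

lemma pv_term_ne_zero (c e : Int) :
    PySem.Int.toStr c ++ "x" ++ "^" ++ PySem.Int.toStr e ≠ "0" := by
  intro h
  have hl := congrArg String.toList h
  rw [pv_toList_term] at hl
  rw [show ("0" : String).toList = ['0'] from by decide] at hl
  have := congrArg List.length hl
  simp [List.length_append] at this
  omega

lemma pv_append_x_caret (a b : String) : a ++ "x^" ++ b = a ++ "x" ++ "^" ++ b := by
  rw [show ("x^" : String) = "x" ++ "^" from by decide, ← String.append_assoc]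

lemma pv_fold_dedup (l : List String) :
    List.foldl (fun acc x => if x ∈ acc then acc else acc ++ [x]) [] l = PySem.List.dedup l := by
  have hf : (fun (acc : List String) x => if x ∈ acc then acc else acc ++ [x]) = PySem.Set.add := by
    funext acc x
    simp [PySem.Set.add]
  rw [hf]
  rfl

lemma pv_dedup_filter (p : String → Bool) (l : List String) :
    (PySem.List.dedup l).filter p = PySem.List.dedup (l.filter p) := by
  show (PySem.Set.ofList l).filter p = PySem.Set.ofList (l.filter p)
  induction l with
  | nil => rfl
  | cons x xs ih =>
    rw [PySem.Set.ofList_cons]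
    have hcomm : ∀ (q r : String → Bool) (m : List String),
        (m.filter q).filter r = (m.filter r).filter q := by
      intro q r m
      simp [List.filter_filter, Bool.and_comm]
    by_cases hp : p x
    · simp only [List.filter_cons, hp, if_pos, PySem.Set.ofList_cons, PySem.Set.discard]
      rw [hcomm, ih]
    · simp only [List.filter_cons, hp, if_neg, Bool.false_eq_true, not_false_iff,
        PySem.Set.discard]
      rw [hcomm, ih]
      apply List.filter_eq_self.mpr
      intro y hy
      have hyx : y ∈ xs.filter p := (PySem.Set.mem_ofList _ _).mp hy
      have hpy : p y = true := List.of_mem_filter hyx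
      have : y ≠ x := by
        intro hxy
        rw [hxy] at hpy
        exact hp hpy
      simp [this]

lemma pv_dedup_const (a : String) :
    ∀ (l : List String), l ≠ [] → (∀ x ∈ l, x = a) → PySem.List.dedup l = [a] := by
  intro l
  cases l with
  | nil => intro h; exact absurd rfl h
  | cons x xs =>
    intro _ hall
    show PySem.Set.ofList (x :: xs) = [a]
    rw [PySem.Set.ofList_cons, hall x List.mem_cons_self]
    have : (PySem.Set.ofList xs).discard a = [] := by
      apply List.filter_eq_nil_iff.mpr
      intro y hy
      have := hall y (List.mem_cons_of_mem _ ((PySem.Set.mem_ofList _ _).mp hy))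
      simp [this]
    rw [this]

lemma pv_two_mem {α : Type} {a b : α} {l : List α} (ha : a ∈ l) (hb : b ∈ l) (hne : a ≠ b) :
    1 < l.length := by
  match l with
  | [] => simp at ha
  | [x] =>
    simp only [List.mem_singleton] at ha hb
    exact absurd (ha.trans hb.symm) hne
  | x :: y :: t => simp

lemma pv_join_nil (sep : String) : PySem.Str.join sep [] = "" := by
  simp [PySem.Str.join, PySem.Chars.join_nil]

lemma pv_join_one (sep t : String) : PySem.Str.join sep [t] = t := by
  simp [PySem.Str.join, PySem.Chars.join_singleton]

lemma pv_core (v : Int → Int) (exps : List Int) (hnd : exps.Nodup) :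
    PySem.Str.join " + "
      (if (PySem.List.dedup (exps.map
            (fun e => if v e ≠ 0 then PySem.Int.toStr (v e) ++ "x" ++ "^" ++ PySem.Int.toStr e else "0"))).length > 1 then
        if "0" ∈ exps.map
            (fun e => if v e ≠ 0 then PySem.Int.toStr (v e) ++ "x" ++ "^" ++ PySem.Int.toStr e else "0") then
          (PySem.List.remove?
              (PySem.List.dedup (exps.map
                (fun e => if v e ≠ 0 then PySem.Int.toStr (v e) ++ "x" ++ "^" ++ PySem.Int.toStr e else "0"))) "0").getD
            (PySem.List.dedup (exps.map
              (fun e => if v e ≠ 0 then PySem.Int.toStr (v e) ++ "x" ++ "^" ++ PySem.Int.toStr e else "0")))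
        else
          PySem.List.dedup (exps.map
            (fun e => if v e ≠ 0 then PySem.Int.toStr (v e) ++ "x" ++ "^" ++ PySem.Int.toStr e else "0"))
      else
        PySem.List.dedup (exps.map
          (fun e => if v e ≠ 0 then PySem.Int.toStr (v e) ++ "x" ++ "^" ++ PySem.Int.toStr e else "0")))
    = if (exps.filter (fun e => v e ≠ 0)).map
          (fun e => PySem.Int.toStr (v e) ++ "x" ++ "^" ++ PySem.Int.toStr e) ≠ [] then
        PySem.Str.join " + "
          ((exps.filter (fun e => v e ≠ 0)).map
            (fun e => PySem.Int.toStr (v e) ++ "x" ++ "^" ++ PySem.Int.toStr e))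
      else if exps ≠ [] then "0" else "" := by
  set term : Int → String :=
    fun e => PySem.Int.toStr (v e) ++ "x" ++ "^" ++ PySem.Int.toStr e with hterm
  set g : Int → String := fun e => if v e ≠ 0 then term e else "0" with hg
  set nz := exps.filter (fun e => v e ≠ 0) with hnz
  have hterm_ne : ∀ e : Int, term e ≠ "0" := fun e => pv_term_ne_zero (v e) e
  by_cases hz : ∃ e ∈ exps, v e = 0
  · obtain ⟨e0, he0, hv0⟩ := hz
    have h0mem : "0" ∈ exps.map g := by
      refine List.mem_map.mpr ⟨e0, he0, ?_⟩
      simp [hg, hv0]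
    by_cases hnze : nz = []
    · -- every coefficient is zero: A's dedup is ["0"], nothing removed, result "0"
      have hall : ∀ e ∈ exps, v e = 0 := by
        intro e he
        by_contra hne
        have : e ∈ nz := List.mem_filter.mpr ⟨he, by simpa using hne⟩
        rw [hnze] at this
        simp at this
      have hexne : exps ≠ [] := by
        intro h
        rw [h] at he0
        simp at he0
      have hmap0 : ∀ x ∈ exps.map g, x = "0" := by
        intro x hx
        obtain ⟨e, he, hge⟩ := List.mem_map.mp hx
        rw [← hge]
        simp [hg, hall e he]
      have hgnil : exps.map g ≠ [] := by
        simpa using hexne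
      rw [pv_dedup_const "0" (exps.map g) hgnil hmap0]
      have hnzmap : nz.map (fun e => term e) = [] := by rw [hnze]; rfl
      simp only [hnzmap, List.length_singleton, gt_iff_lt, lt_irrefl, if_false,
        ne_eq, not_true_eq_false, if_false]
      rw [if_pos hexne, pv_join_one]
    · -- mixed: dedup keeps each non-zero term once plus one "0", which is then removed
      obtain ⟨e1, he1nz⟩ := List.exists_mem_of_ne_nil nz hnze
      have he1 : e1 ∈ exps := (List.mem_filter.mp he1nz).1
      have hv1 : v e1 ≠ 0 := by simpa using (List.mem_filter.mp he1nz).2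
      have ht1mem : term e1 ∈ exps.map g := by
        refine List.mem_map.mpr ⟨e1, he1, ?_⟩
        simp [hg, hv1]
      have hlen : 1 < (PySem.List.dedup (exps.map g)).length := by
        refine pv_two_mem ((PySem.List.mem_dedup _ _).mpr h0mem)
          ((PySem.List.mem_dedup _ _).mpr ht1mem) ?_
        exact fun h => hterm_ne e1 h.symm
      have h0dd : "0" ∈ PySem.List.dedup (exps.map g) := (PySem.List.mem_dedup _ _).mpr h0mem
      rw [if_pos hlen, if_pos h0mem,
        PySem.List.remove?_eq_some_erase _ _ h0dd, Option.getD_some,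
        (PySem.List.nodup_dedup _).erase_eq_filter "0",
        pv_dedup_filter]
      have hfg : (exps.map g).filter (fun x => x != "0") = nz.map term := by
        rw [List.filter_map]
        have hpred : exps.filter ((fun x => x != "0") ∘ g) = nz := by
          rw [hnz]
          apply List.filter_congr
          intro e _
          by_cases he : v e = 0 <;> simp [hg, he, hterm_ne e]
        rw [hpred]
        apply List.map_congr_left
        intro e he
        have : v e ≠ 0 := by simpa using (List.mem_filter.mp he).2
        simp [hg, this]
      rw [hfg]
      have hnzterms : (nz.map term).Nodup := by
        apply List.Nodup.map_on
        · intro x hx y hy hxy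
          exact pv_term_inj hxy
        · exact hnd.filter _
      rw [show PySem.List.dedup (nz.map term) = nz.map term from
        PySem.Set.ofList_eq_self_of_nodup _ hnzterms]
      have : nz.map term ≠ [] := by simpa using hnze
      rw [if_pos this]
  · -- no zero coefficient at all: dedup is the identity and nothing is removed
    push_neg at hz
    have hmap : exps.map g = exps.map term := by
      apply List.map_congr_left
      intro e he
      simp [hg, hz e he]
    have hnzall : nz = exps := by
      rw [hnz]
      apply List.filter_eq_self.mpr
      intro e he
      simpa using hz e he
    have hnodup : (exps.map term).Nodup := by
      apply List.Nodup.map_on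
      · intro x hx y hy hxy
        exact pv_term_inj hxy
      · exact hnd
    have h0nm : "0" ∉ exps.map term := by
      intro h
      obtain ⟨e, _, hge⟩ := List.mem_map.mp h
      exact hterm_ne e hge
    rw [hmap, show PySem.List.dedup (exps.map term) = exps.map term from
      PySem.Set.ofList_eq_self_of_nodup _ hnodup]
    rw [if_neg h0nm, ite_self, hnzall]
    by_cases hex : exps = []
    · subst hex
      simp [pv_join_nil]
    · have : exps.map term ≠ [] := by simpa using hex
      rw [if_pos this]


-- ===== VERDICT (by name: the statement is the Claim_ definition above) =====
theorem create_poly_sentence_spec : Claim_equal_create_poly_sentence := by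
  intro dict _hdom hpre
  unfold Spec_create_poly_sentence
  simp only [create_poly_sentence, create_poly_sentence_alt]
  have hnd : (PySem.List.sorted (dict.map Prod.fst) (fun x => x) true).Nodup :=
    ((PySem.List.sorted_perm _ _ _).nodup_iff).mpr hpre
  have hBterm : (fun e => PySem.Int.toStr ((dict.lookup e).getD 0) ++ "x^" ++ PySem.Int.toStr e)
      = (fun e => PySem.Int.toStr ((dict.lookup e).getD 0) ++ "x" ++ "^" ++ PySem.Int.toStr e) := by
    funext e
    exact pv_append_x_caret _ _
  rw [hBterm,
    PySem.List.foldl_append_singleton_eq_map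
      (fun exponent => if ((dict.lookup exponent).getD 0) ≠ 0 then
        PySem.Int.toStr ((dict.lookup exponent).getD 0) ++ "x" ++ "^" ++ PySem.Int.toStr exponent
      else "0")
      (PySem.List.sorted (dict.map Prod.fst) (fun x => x) true) [],
    List.nil_append, pv_fold_dedup]
  simp only [show (dict ≠ []) = (PySem.List.sorted (dict.map Prod.fst) (fun x => x) true ≠ []) from
    by simp [PySem.List.sorted_eq_nil_iff]]
  exact pv_core (fun e => (dict.lookup e).getD 0) _ hnd
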